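-- pv_equiv track=rewrite | github.com/SleepyTurtle91/extropos | extract_reports_screen_parts.py | _add_part_directives
-- ===== SOURCE A (Python) =====
-- def _add_part_directives(lines):
--     part_lines = [
--         "part 'reports_screen_content.dart';",
--         "part 'reports_screen_operations.dart';",
--         "part 'reports_screen_view_widgets.dart';",
--         "part 'reports_screen_ui_helpers.dart';",
--         "part 'reports_screen_content_part1.dart';",
--         "part 'reports_screen_content_part2.dart';",
--     ]
--
--     if any("part 'reports_screen_operations.dart'" in line for line in lines):
--         return lines
--
--     output = []
--     inserted = False
--     for line in lines:
--         if not inserted and line.startswith('part '):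
--             output.extend(part_lines)
--             inserted = True
--             continue
--         if not inserted and line.startswith('enum ReportFormat'):
--             output.extend(part_lines)
--             output.append('')
--             inserted = True
--         output.append(line)
--
--     return output
-- ===== SOURCE B (Python) =====
-- def _add_part_directives(lines):
--     part_lines = [
--         "part 'reports_screen_content.dart';",
--         "part 'reports_screen_operations.dart';",
--         "part 'reports_screen_view_widgets.dart';",
--         "part 'reports_screen_ui_helpers.dart';",
--         "part 'reports_screen_content_part1.dart';",
--         "part 'reports_screen_content_part2.dart';",
--     ]
--
--     if any("part 'reports_screen_operations.dart'" in line for line in lines):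
--         return lines
--
--     for i, line in enumerate(lines):
--         if line.startswith('part '):
--             # replace the first 'part ' line with the full block
--             return lines[:i] + part_lines + lines[i + 1:]
--         if line.startswith('enum ReportFormat'):
--             # insert the block (plus a blank line) before the enum
--             return lines[:i] + part_lines + [''] + lines[i:]
--     return list(lines)
-- ===== Notes on version B (the rewrite author's own statement) =====
-- stated objective: simpler
-- what changed: Replaces the flag-driven accumulator loop with a find-first-match-then-splice: locate the first qualifying line by index and build the result with list slicing, dropping the 'inserted' flag and the incremental output list.
import Mathlib
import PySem

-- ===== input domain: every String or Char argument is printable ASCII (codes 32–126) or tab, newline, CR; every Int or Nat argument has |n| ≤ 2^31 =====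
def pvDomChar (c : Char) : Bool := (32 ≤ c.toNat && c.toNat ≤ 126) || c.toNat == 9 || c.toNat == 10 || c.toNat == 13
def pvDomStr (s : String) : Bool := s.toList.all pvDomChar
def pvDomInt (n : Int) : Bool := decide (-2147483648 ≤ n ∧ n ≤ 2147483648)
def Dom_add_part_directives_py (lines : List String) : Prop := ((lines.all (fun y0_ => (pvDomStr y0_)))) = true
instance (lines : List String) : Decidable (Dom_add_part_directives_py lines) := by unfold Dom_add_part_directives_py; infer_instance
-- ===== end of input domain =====

-- B replaces A's flag-driven accumulator loop with find-first-matching-index then list splicing (simpler decomposition, same O(n) cost).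

-- ===== PORT A =====
def pvPartLines : List String := [
  "part 'reports_screen_content.dart';",
  "part 'reports_screen_operations.dart';",
  "part 'reports_screen_view_widgets.dart';",
  "part 'reports_screen_ui_helpers.dart';",
  "part 'reports_screen_content_part1.dart';",
  "part 'reports_screen_content_part2.dart';"]

def pvStepA (acc : List String × Bool) (line : String) : List String × Bool :=
  if !acc.2 && PySem.Str.startswith line "part " then
    (acc.1 ++ pvPartLines, true)
  else if !acc.2 && PySem.Str.startswith line "enum ReportFormat" then
    (acc.1 ++ pvPartLines ++ [""] ++ [line], true)
  else
    (acc.1 ++ [line], acc.2)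

def add_part_directives_py (lines : List String) : List String :=
  if lines.any (fun line => PySem.Str.isIn "part 'reports_screen_operations.dart'" line) then
    lines
  else
    (lines.foldl pvStepA ([], false)).1

-- ===== PORT B =====
-- find the index of the first qualifying line: some (i, true) for a 'part ' line, some (i, false) for 'enum ReportFormat'
def pvScanB : List String → Nat → Option (Nat × Bool)
  | [], _ => none
  | l :: rest, i =>
    if PySem.Str.startswith l "part " then some (i, true)
    else if PySem.Str.startswith l "enum ReportFormat" then some (i, false)
    else pvScanB rest (i + 1)

def add_part_directives_py_alt (lines : List String) : List String :=
  if lines.any (fun line => PySem.Str.isIn "part 'reports_screen_operations.dart'" line) then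
    lines
  else
    match pvScanB lines 0 with
    | some (i, true) =>
        PySem.List.slice lines none (some (i : Int)) ++ pvPartLines
          ++ PySem.List.slice lines (some ((i : Int) + 1)) none
    | some (i, false) =>
        PySem.List.slice lines none (some (i : Int)) ++ pvPartLines ++ [""]
          ++ PySem.List.slice lines (some (i : Int)) none
    | none => lines

-- ===== PRECONDITION & SPEC =====
def Spec_add_part_directives_py (lines : List String) (out : List String) : Prop := out = add_part_directives_py_alt lines
instance (lines : List String) (out : List String) : Decidable (Spec_add_part_directives_py lines out) := by unfold Spec_add_part_directives_py; infer_instance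

-- ===== CLAIM (what is proved, stated in full; the proofs are below) =====
def Claim_equal_add_part_directives_py : Prop := ∀ (lines : List String), Dom_add_part_directives_py lines → Spec_add_part_directives_py lines (add_part_directives_py lines)

-- ===== LEMMAS AND PROOFS =====

-- index-free description of the insertion, used as a bridge between the two ports
def pvCore : List String → List String
  | [] => []
  | l :: rest =>
    if PySem.Str.startswith l "part " then pvPartLines ++ rest
    else if PySem.Str.startswith l "enum ReportFormat" then pvPartLines ++ [""] ++ l :: rest
    else l :: pvCore rest

theorem foldlA_true (rest : List String) (out : List String) :
    rest.foldl pvStepA (out, true) = (out ++ rest, true) := by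
  induction rest generalizing out with
  | nil => simp
  | cons l rest ih =>
      simp [List.foldl, pvStepA, ih]

theorem foldlA_false (lines : List String) (out : List String) :
    (lines.foldl pvStepA (out, false)).1 = out ++ pvCore lines := by
  induction lines generalizing out with
  | nil => simp [pvCore]
  | cons l rest ih =>
      rw [List.foldl_cons, pvCore, pvStepA]
      simp only [Bool.not_false, Bool.true_and]
      by_cases hp : PySem.Str.startswith l "part " = true
      · rw [if_pos hp, if_pos hp, foldlA_true]; simp
      · rw [if_neg hp, if_neg hp]
        by_cases he : PySem.Str.startswith l "enum ReportFormat" = true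
        · rw [if_pos he, if_pos he, foldlA_true]; simp
        · rw [if_neg he, if_neg he, ih]; simp

theorem pvScanB_shift (lines : List String) (i : Nat) :
    pvScanB lines i = (pvScanB lines 0).map (fun p => (p.1 + i, p.2)) := by
  induction lines generalizing i with
  | nil => simp [pvScanB]
  | cons l rest ih =>
      rw [pvScanB, pvScanB]
      by_cases hp : PySem.Str.startswith l "part " = true
      · rw [if_pos hp, if_pos hp]; simp
      · rw [if_neg hp, if_neg hp]
        by_cases he : PySem.Str.startswith l "enum ReportFormat" = true
        · rw [if_pos he, if_pos he]; simp
        · rw [if_neg he, if_neg he, ih (i + 1), ih 1, Option.map_map]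
          rcases pvScanB rest 0 with _ | ⟨j, b⟩
          · simp
          · simp; omega

theorem slice_take (xs : List String) (i : Nat) :
    PySem.List.slice xs none (some (i : Int)) = xs.take i :=
  PySem.List.slice_to_natCast xs i

theorem slice_drop (xs : List String) (i : Nat) :
    PySem.List.slice xs (some (i : Int)) none = xs.drop i :=
  PySem.List.slice_from_natCast xs i

theorem spliceB_eq_core (lines : List String) :
    (match pvScanB lines 0 with
      | some (i, true) =>
          PySem.List.slice lines none (some (i : Int)) ++ pvPartLines
            ++ PySem.List.slice lines (some ((i : Int) + 1)) none
      | some (i, false) =>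
          PySem.List.slice lines none (some (i : Int)) ++ pvPartLines ++ [""]
            ++ PySem.List.slice lines (some (i : Int)) none
      | none => lines) = pvCore lines := by
  induction lines with
  | nil => simp [pvScanB, pvCore]
  | cons l rest ih =>
      rw [pvScanB, pvCore]
      by_cases hp : PySem.Str.startswith l "part " = true
      · rw [if_pos hp, if_pos hp]
        simp only []
        rw [slice_take, show ((0 : Nat) : Int) + 1 = ((1 : Nat) : Int) by norm_num, slice_drop]
        simp
      · rw [if_neg hp, if_neg hp]
        by_cases he : PySem.Str.startswith l "enum ReportFormat" = true
        · rw [if_pos he, if_pos he]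
          simp only []
          rw [slice_take, slice_drop]
          simp
        · rw [if_neg he, if_neg he, pvScanB_shift rest 1]
          rcases hscan : pvScanB rest 0 with _ | ⟨j, b⟩
          · rw [hscan] at ih
            simp only [Option.map_none]
            simp only [] at ih
            rw [← ih]
          · rw [hscan] at ih
            cases b
            · simp only [Option.map_some]
              simp only [] at ih ⊢
              rw [slice_take, slice_drop] at ih
              rw [slice_take, slice_drop]
              simp only [List.take_succ_cons, List.drop_succ_cons]
              rw [← ih]
              simp
            · simp only [Option.map_some]
              simp only [] at ih ⊢
              rw [slice_take,
                show ((j : Nat) : Int) + 1 = (((j + 1 : Nat)) : Int) by push_cast; ring,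
                slice_drop] at ih
              rw [slice_take,
                show (((j + 1 : Nat)) : Int) + 1 = (((j + 2 : Nat)) : Int) by push_cast; ring,
                slice_drop]
              simp only [List.take_succ_cons, List.drop_succ_cons]
              rw [← ih]
              simp

-- ===== VERDICT (by name: the statement is the Claim_ definition above) =====
theorem add_part_directives_py_spec : Claim_equal_add_part_directives_py := by
  intro lines _
  unfold Spec_add_part_directives_py add_part_directives_py add_part_directives_py_alt
  by_cases h : (lines.any (fun line => PySem.Str.isIn "part 'reports_screen_operations.dart'" line)) = true
  · rw [if_pos h, if_pos h]
  · rw [if_neg h, if_neg h, foldlA_false lines [], ← spliceB_eq_core lines]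
    simp
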